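-- pv_equiv track=rewrite | github.com/wphyojpl/incubator-sdap-nexus | analysis/webservice/algorithms/doms/config.py | validate_insitu_params
-- ===== SOURCE A (Python) =====
-- INSITU_PROVIDER_MAP = [
--     {
--         'name': 'NCAR',
--         'projects': [
--             {
--                 'name': 'ICOADS Release 3.0',
--                 'platforms': ['0', '16', '17', '30', '41', '42']
--             }
--         ]
--     },
--     {
--         'name': 'Florida State University, COAPS',
--         'projects': [
--             {
--                 'name': 'SAMOS',
--                 'platforms': ['30']
--             }
--         ]
--     },
--     {
--         'name': 'Saildrone',
--         'projects': [
--             {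
--                 'name': '1021_atlantic',
--                 'platforms': ['3B']
--             },
--             {
--                 'name': 'antarctic_circumnavigation_2019',
--                 'platforms': ['3B']
--             },
--             {
--                 'name': 'atlantic_to_med_2019_to_2020',
--                 'platforms': ['3B']
--             },
--             {
--                 'name': 'shark-2018',
--                 'platforms': ['3B']
--             }
--         ]
--     }
-- ]
--
-- def validate_insitu_params(provider_name, project_name, platform_name):
--     """
--     Validate the provided params. The project should be within the
--     given provider and the platform should be appropriate for the
--     given project.
--     """
--     provider = next((provider for provider in INSITU_PROVIDER_MAP
--                      if provider['name'] == provider_name), None)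
--
--     if provider is None:
--         return False
--
--     project = next((project for project in provider['projects']
--                     if project_name == project['name']), None)
--
--     if project is None:
--         return False
--
--     return platform_name in project['platforms']
-- ===== SOURCE B (Python) =====
-- INSITU_PROVIDER_MAP = [
--     {
--         'name': 'NCAR',
--         'projects': [
--             {
--                 'name': 'ICOADS Release 3.0',
--                 'platforms': ['0', '16', '17', '30', '41', '42']
--             }
--         ]
--     },
--     {
--         'name': 'Florida State University, COAPS',
--         'projects': [
--             {
--                 'name': 'SAMOS',
--                 'platforms': ['30']
--             }
--         ]
--     },
--     {
--         'name': 'Saildrone',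
--         'projects': [
--             {
--                 'name': '1021_atlantic',
--                 'platforms': ['3B']
--             },
--             {
--                 'name': 'antarctic_circumnavigation_2019',
--                 'platforms': ['3B']
--             },
--             {
--                 'name': 'atlantic_to_med_2019_to_2020',
--                 'platforms': ['3B']
--             },
--             {
--                 'name': 'shark-2018',
--                 'platforms': ['3B']
--             }
--         ]
--     }
-- ]
--
-- # Flat table of every valid (provider, project, platform) triple, built once.
-- # A list (not a set) so membership compares element-wise with ==.
-- _VALID_TRIPLES = [
--     (provider['name'], project['name'], platform)
--     for provider in INSITU_PROVIDER_MAP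
--     for project in provider['projects']
--     for platform in project['platforms']
-- ]
--
--
-- def validate_insitu_params(provider_name, project_name, platform_name):
--     return (provider_name, project_name, platform_name) in _VALID_TRIPLES
-- ===== Notes on version B (the rewrite author's own statement) =====
-- stated objective: simpler
-- what changed: Replaces the three nested short-circuiting next() scans over the nested provider/project dicts with a flat list of valid (provider, project, platform) triples precomputed once at module load, so validation is a single membership test.
import Mathlib
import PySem

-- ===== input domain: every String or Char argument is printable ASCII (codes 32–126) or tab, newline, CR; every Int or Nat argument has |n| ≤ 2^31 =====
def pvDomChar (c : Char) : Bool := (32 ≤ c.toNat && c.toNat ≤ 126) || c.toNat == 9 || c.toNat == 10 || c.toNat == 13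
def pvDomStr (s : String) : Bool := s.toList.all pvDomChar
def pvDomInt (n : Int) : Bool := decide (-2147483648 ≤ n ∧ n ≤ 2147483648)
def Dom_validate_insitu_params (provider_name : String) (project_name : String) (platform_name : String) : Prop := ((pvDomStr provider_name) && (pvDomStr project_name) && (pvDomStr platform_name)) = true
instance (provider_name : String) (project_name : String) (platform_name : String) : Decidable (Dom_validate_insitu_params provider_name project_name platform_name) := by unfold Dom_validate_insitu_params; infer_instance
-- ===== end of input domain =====

-- B replaces A's three nested first-match scans by one precomputed flat list of
-- valid (provider, project, platform) triples and a single membership test (simpler).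

-- ===== PORT A =====
-- INSITU_PROVIDER_MAP: each provider is (name, projects); each project is (name, platforms).
def insituProviderMap : List (String × List (String × List String)) :=
  [ ("NCAR", [("ICOADS Release 3.0", ["0", "16", "17", "30", "41", "42"])]),
    ("Florida State University, COAPS", [("SAMOS", ["30"])]),
    ("Saildrone",
      [ ("1021_atlantic", ["3B"]),
        ("antarctic_circumnavigation_2019", ["3B"]),
        ("atlantic_to_med_2019_to_2020", ["3B"]),
        ("shark-2018", ["3B"]) ]) ]

def validate_insitu_params (provider_name : String) (project_name : String) (platform_name : String) : Bool :=
  -- provider = next((provider for provider in INSITU_PROVIDER_MAP if provider['name'] == provider_name), None)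
  match insituProviderMap.find? (fun provider => provider.1 == provider_name) with
  | none => false
  | some provider =>
    -- project = next((project for project in provider['projects'] if project_name == project['name']), None)
    match provider.2.find? (fun project => project_name == project.1) with
    | none => false
    | some project =>
      -- return platform_name in project['platforms']
      project.2.contains platform_name

-- ===== PORT B =====
-- _VALID_TRIPLES: flat table built once from the map (the list comprehension in Source B).
def validTriples : List (String × String × String) :=
  insituProviderMap.flatMap (fun provider =>
    provider.2.flatMap (fun project =>
      project.2.map (fun platform => (provider.1, project.1, platform))))

def validate_insitu_params_alt (provider_name : String) (project_name : String) (platform_name : String) : Bool :=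
  validTriples.contains (provider_name, project_name, platform_name)

-- ===== PRECONDITION & SPEC =====
def Spec_validate_insitu_params (provider_name : String) (project_name : String) (platform_name : String) (out : Bool) : Prop := out = validate_insitu_params_alt provider_name project_name platform_name
instance (provider_name : String) (project_name : String) (platform_name : String) (out : Bool) : Decidable (Spec_validate_insitu_params provider_name project_name platform_name out) := by unfold Spec_validate_insitu_params; infer_instance

-- ===== CLAIM (what is proved, stated in full; the proofs are below) =====
def Claim_equal_validate_insitu_params : Prop := ∀ (provider_name : String) (project_name : String) (platform_name : String), Dom_validate_insitu_params provider_name project_name platform_name → Spec_validate_insitu_params provider_name project_name platform_name (validate_insitu_params provider_name project_name platform_name)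

-- ===== LEMMAS AND PROOFS =====
theorem validate_eq (p q r : String) :
    validate_insitu_params p q r = validate_insitu_params_alt p q r := by
  by_cases h1 : "NCAR" = p
  · subst h1
    by_cases g1 : q = "ICOADS Release 3.0"
    · subst g1
      simp [validate_insitu_params, validate_insitu_params_alt, validTriples,
        insituProviderMap, Prod.ext_iff]
    · simp [validate_insitu_params, validate_insitu_params_alt, validTriples,
        insituProviderMap, List.find?, Prod.ext_iff, g1, beq_eq_false_iff_ne.mpr g1]
  · by_cases h2 : "Florida State University, COAPS" = p
    · subst h2
      by_cases g2 : q = "SAMOS"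
      · subst g2
        simp [validate_insitu_params, validate_insitu_params_alt, validTriples,
          insituProviderMap, Prod.ext_iff]
      · simp [validate_insitu_params, validate_insitu_params_alt, validTriples,
          insituProviderMap, List.find?, Prod.ext_iff, g2, beq_eq_false_iff_ne.mpr g2]
    · by_cases h3 : "Saildrone" = p
      · subst h3
        by_cases g3 : q = "1021_atlantic"
        · subst g3
          simp [validate_insitu_params, validate_insitu_params_alt, validTriples,
            insituProviderMap, Prod.ext_iff]
        · by_cases g4 : q = "antarctic_circumnavigation_2019"
          · subst g4
            simp [validate_insitu_params, validate_insitu_params_alt, validTriples,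
              insituProviderMap, Prod.ext_iff]
          · by_cases g5 : q = "atlantic_to_med_2019_to_2020"
            · subst g5
              simp [validate_insitu_params, validate_insitu_params_alt, validTriples,
                insituProviderMap, Prod.ext_iff]
            · by_cases g6 : q = "shark-2018"
              · subst g6
                simp [validate_insitu_params, validate_insitu_params_alt, validTriples,
                  insituProviderMap, Prod.ext_iff]
              · simp [validate_insitu_params, validate_insitu_params_alt, validTriples,
                  insituProviderMap, List.find?, Prod.ext_iff, g3, g4, g5, g6,
                  beq_eq_false_iff_ne.mpr g3, beq_eq_false_iff_ne.mpr g4,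
                  beq_eq_false_iff_ne.mpr g5, beq_eq_false_iff_ne.mpr g6]
      · simp [validate_insitu_params, validate_insitu_params_alt, validTriples,
          insituProviderMap, List.find?, Prod.ext_iff,
          beq_eq_false_iff_ne.mpr h1, beq_eq_false_iff_ne.mpr h2, beq_eq_false_iff_ne.mpr h3,
          Ne.symm h1, Ne.symm h2, Ne.symm h3]

-- ===== VERDICT (by name: the statement is the Claim_ definition above) =====
theorem validate_insitu_params_spec : Claim_equal_validate_insitu_params := by
  intro p q r _
  unfold Spec_validate_insitu_params
  exact validate_eq p q r
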